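-- pv_equiv track=rewrite | github.com/Kamalllx/academic_analyzer | backend/analytics/learning_analytics.py | _classify_question_types
-- ===== SOURCE A (Python) =====
-- from typing import Dict, List, Any
--
-- def _classify_question_types(questions: List[str]) -> List[str]:
--     """Classify questions by type"""
--     types = []
--
--     for question in questions:
--         question_lower = question.lower().strip()
--
--         if question_lower.startswith(('what', 'who', 'when', 'where')):
--             types.append('factual')
--         elif question_lower.startswith(('how', 'why')):
--             types.append('explanatory')
--         elif question_lower.startswith(('compare', 'contrast', 'difference')):
--             types.append('comparative')
--         elif question_lower.startswith(('analyze', 'evaluate', 'assess')):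
--             types.append('analytical')
--         elif '?' not in question:
--             types.append('statement')
--         else:
--             types.append('other')
--
--     return types
-- ===== SOURCE B (Python) =====
-- # Walks each question through a hand-compiled character trie of the keyword
-- # prefixes (shared prefixes like "wh" are tested once, one char at a time)
-- # instead of testing whole-keyword startswith alternatives.
-- _TRIE = {
--     'w': {'h': {'a': {'t': 'factual'},
--                 'o': 'factual',
--                 'e': {'n': 'factual', 'r': {'e': 'factual'}},
--                 'y': 'explanatory'}},
--     'h': {'o': {'w': 'explanatory'}},
--     'c': {'o': {'m': {'p': {'a': {'r': {'e': 'comparative'}}}},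
--                 'n': {'t': {'r': {'a': {'s': {'t': 'comparative'}}}}}}},
--     'd': {'i': {'f': {'f': {'e': {'r': {'e': {'n': {'c': {'e': 'comparative'}}}}}}}}},
--     'a': {'n': {'a': {'l': {'y': {'z': {'e': 'analytical'}}}}},
--           's': {'s': {'e': {'s': {'s': 'analytical'}}}}},
--     'e': {'v': {'a': {'l': {'u': {'a': {'t': {'e': 'analytical'}}}}}}},
-- }
--
--
-- def _match_trie(q):
--     node = _TRIE
--     for ch in q:
--         nxt = node.get(ch)
--         if nxt is None:
--             return None
--         if isinstance(nxt, str):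
--             return nxt
--         node = nxt
--     return None
--
--
-- def _classify_question_types(questions):
--     """Classify questions by type"""
--     types = []
--     for question in questions:
--         label = _match_trie(question.lower().strip())
--         if label is None:
--             label = 'statement' if '?' not in question else 'other'
--         types.append(label)
--     return types
-- ===== Notes on version B (the rewrite author's own statement) =====
-- stated objective: alternative
-- what changed: Replaces the chain of whole-keyword startswith tests by a single character-by-character walk through a hand-compiled trie of the keyword prefixes (shared prefixes like 'wh' examined once); correctness relies on no keyword being a prefix of another, so at most one keyword can match.
import Mathlib
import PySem

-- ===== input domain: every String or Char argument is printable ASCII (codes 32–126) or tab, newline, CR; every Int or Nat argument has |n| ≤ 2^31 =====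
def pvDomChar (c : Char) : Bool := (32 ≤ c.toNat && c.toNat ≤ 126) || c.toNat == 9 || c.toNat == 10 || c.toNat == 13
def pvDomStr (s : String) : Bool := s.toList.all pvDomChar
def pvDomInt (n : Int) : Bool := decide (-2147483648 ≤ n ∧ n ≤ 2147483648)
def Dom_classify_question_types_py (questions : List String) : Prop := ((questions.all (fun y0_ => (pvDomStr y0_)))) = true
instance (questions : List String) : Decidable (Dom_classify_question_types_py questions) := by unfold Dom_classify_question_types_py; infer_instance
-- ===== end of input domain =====

-- B replaces A's chain of whole-keyword startswith tests by a character-by-character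
-- walk through a hand-compiled trie of the keywords (objective: alternative algorithm).

-- ===== PORT A =====
-- the if/elif chain, with question_lower passed as a parameter
def pvChainA (ql : String) (question : String) : String :=
  if PySem.Str.startswith ql "what" || PySem.Str.startswith ql "who" ||
     PySem.Str.startswith ql "when" || PySem.Str.startswith ql "where" then "factual"
  else if PySem.Str.startswith ql "how" || PySem.Str.startswith ql "why" then "explanatory"
  else if PySem.Str.startswith ql "compare" || PySem.Str.startswith ql "contrast" ||
          PySem.Str.startswith ql "difference" then "comparative"
  else if PySem.Str.startswith ql "analyze" || PySem.Str.startswith ql "evaluate" ||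
          PySem.Str.startswith ql "assess" then "analytical"
  else if !(PySem.Str.isIn "?" question) then "statement"
  else "other"

def pvClassifyOneA (question : String) : String :=
  pvChainA (PySem.Str.strip (PySem.Str.lower question)) question

def classify_question_types_py (questions : List String) : List String :=
  questions.foldl (fun types question => types ++ [pvClassifyOneA question]) []

-- ===== PORT B =====
-- The nested-dict trie of Source B: a dict value is either a string label (leaf) or a
-- sub-dict; a dict itself is its association list (nil / cons key child rest).
inductive PvTrie where
  | leaf : String → PvTrie
  | nil : PvTrie
  | cons : Char → PvTrie → PvTrie → PvTrie
deriving DecidableEq, Repr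

def pvMapGet : PvTrie → Char → Option PvTrie
  | .cons k t r, c => if k == c then some t else pvMapGet r c
  | _, _ => none

-- Source B's _match_trie: walk the trie one character at a time
def pvWalk : PvTrie → List Char → Option String
  | _, [] => none
  | m, c :: cs =>
    match pvMapGet m c with
    | none => none
    | some (.leaf s) => some s
    | some t => pvWalk t cs

def pvTrieRoot : PvTrie :=
  .cons 'w' (.cons 'h' (.cons 'a' (.cons 't' (.leaf "factual") .nil)
              (.cons 'o' (.leaf "factual")
              (.cons 'e' (.cons 'n' (.leaf "factual") (.cons 'r' (.cons 'e' (.leaf "factual") .nil) .nil))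
              (.cons 'y' (.leaf "explanatory") .nil)))) .nil)
  (.cons 'h' (.cons 'o' (.cons 'w' (.leaf "explanatory") .nil) .nil)
  (.cons 'c' (.cons 'o' (.cons 'm' (.cons 'p' (.cons 'a' (.cons 'r' (.cons 'e' (.leaf "comparative") .nil) .nil) .nil) .nil)
              (.cons 'n' (.cons 't' (.cons 'r' (.cons 'a' (.cons 's' (.cons 't' (.leaf "comparative") .nil) .nil) .nil) .nil) .nil) .nil)) .nil)
  (.cons 'd' (.cons 'i' (.cons 'f' (.cons 'f' (.cons 'e' (.cons 'r' (.cons 'e' (.cons 'n' (.cons 'c' (.cons 'e' (.leaf "comparative") .nil) .nil) .nil) .nil) .nil) .nil) .nil) .nil) .nil)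
  (.cons 'a' (.cons 'n' (.cons 'a' (.cons 'l' (.cons 'y' (.cons 'z' (.cons 'e' (.leaf "analytical") .nil) .nil) .nil) .nil) .nil)
              (.cons 's' (.cons 's' (.cons 'e' (.cons 's' (.cons 's' (.leaf "analytical") .nil) .nil) .nil) .nil) .nil))
  (.cons 'e' (.cons 'v' (.cons 'a' (.cons 'l' (.cons 'u' (.cons 'a' (.cons 't' (.cons 'e' (.leaf "analytical") .nil) .nil) .nil) .nil) .nil) .nil) .nil) .nil)))))

def pvMatchTrie (q : String) : Option String := pvWalk pvTrieRoot q.toList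

def pvClassifyOneB (question : String) : String :=
  match pvMatchTrie (PySem.Str.strip (PySem.Str.lower question)) with
  | some lab => lab
  | none => if !(PySem.Str.isIn "?" question) then "statement" else "other"

def classify_question_types_py_alt (questions : List String) : List String :=
  questions.foldl (fun types question => types ++ [pvClassifyOneB question]) []

-- ===== PRECONDITION & SPEC =====
def Spec_classify_question_types_py (questions : List String) (out : List String) : Prop := out = classify_question_types_py_alt questions
instance (questions : List String) (out : List String) : Decidable (Spec_classify_question_types_py questions out) := by unfold Spec_classify_question_types_py; infer_instance

-- ===== CLAIM (what is proved, stated in full; the proofs are below) =====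
def Claim_equal_classify_question_types_py : Prop := ∀ (questions : List String), Dom_classify_question_types_py questions → Spec_classify_question_types_py questions (classify_question_types_py questions)

-- ===== LEMMAS AND PROOFS =====

-- first label among a list of (prefix pattern, label) pairs
def pvFM (l : List Char) : List (List Char × String) → Option String
  | [] => none
  | (p, lab) :: r => if PySem.Chars.startswith l p then some lab else pvFM l r

-- residual patterns of a trie (in trie order)
def pvRes : PvTrie → List (List Char × String)
  | .leaf s => [([], s)]
  | .nil => []
  | .cons c t r => (pvRes t).map (fun pr => (c :: pr.1, pr.2)) ++ pvRes r

def pvKeys : PvTrie → List Char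
  | .cons c _ r => c :: pvKeys r
  | _ => []

def pvIsLeaf : PvTrie → Bool
  | .leaf _ => true
  | _ => false

def pvIsNil : PvTrie → Bool
  | .nil => true
  | _ => false

-- well-formed map: distinct keys, rest is a map, children are nonempty
def pvWF : PvTrie → Bool
  | .leaf _ => true
  | .nil => true
  | .cons c t r => !(pvKeys r).contains c && !pvIsNil t && !pvIsLeaf r && pvWF t && pvWF r

theorem pvFM_append (l : List Char) (R1 R2 : List (List Char × String)) :
    pvFM l (R1 ++ R2) = ((pvFM l R1).or (pvFM l R2)) := by
  induction R1 with
  | nil => simp [pvFM]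
  | cons p r ih => obtain ⟨p, lab⟩ := p; simp [pvFM, ih]; split <;> simp

theorem pvFM_map_cons (c : Char) (cs : List Char) (R : List (List Char × String)) :
    pvFM (c :: cs) (R.map (fun pr => (c :: pr.1, pr.2))) = pvFM cs R := by
  induction R with
  | nil => simp [pvFM]
  | cons p r ih =>
      obtain ⟨p, lab⟩ := p
      simp [pvFM, ih, PySem.Chars.startswith, List.isPrefixOf]

theorem pvRes_heads (m : PvTrie) (hwf : pvWF m = true) (h : pvIsLeaf m = false) :
    ∀ pr ∈ pvRes m, ∃ k p', pr.1 = k :: p' ∧ k ∈ pvKeys m := by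
  induction m with
  | leaf s => simp [pvIsLeaf] at h
  | nil => simp [pvRes]
  | cons c t r iht ihr =>
      simp only [pvWF, Bool.and_eq_true, Bool.not_eq_true'] at hwf
      obtain ⟨⟨⟨⟨hkey, htnil⟩, hrleaf⟩, hwft⟩, hwfr⟩ := hwf
      intro pr hpr
      simp only [pvRes, List.mem_append, List.mem_map] at hpr
      rcases hpr with ⟨q, _, rfl⟩ | hpr
      · exact ⟨c, q.1, rfl, by simp [pvKeys]⟩
      · obtain ⟨k, p', h1, h2⟩ := ihr hwfr hrleaf pr hpr
        exact ⟨k, p', h1, by cases r <;> simp_all [pvKeys]⟩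

theorem pvFM_none_of_miss (l : List Char) (R : List (List Char × String))
    (h : ∀ pr ∈ R, PySem.Chars.startswith l pr.1 = false) : pvFM l R = none := by
  induction R with
  | nil => rfl
  | cons p r ih =>
      obtain ⟨p, lab⟩ := p
      simp [pvFM, h (p, lab) (by simp)]
      exact ih fun pr hpr => h pr (by simp [hpr])

theorem pvFM_res_none_of_not_key (c : Char) (cs : List Char) (m : PvTrie)
    (hwf : pvWF m = true) (hleaf : pvIsLeaf m = false) (hc : c ∉ pvKeys m) :
    pvFM (c :: cs) (pvRes m) = none := by
  apply pvFM_none_of_miss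
  intro pr hpr
  obtain ⟨k, p', hp, hk⟩ := pvRes_heads m hwf hleaf pr hpr
  have hkc : ¬ (k == c) = true := by simp; rintro rfl; exact hc hk
  simp [hp, PySem.Chars.startswith, List.isPrefixOf]
  intro h; exact absurd (by simp [h]) hkc

theorem pvWalk_eq_pvFM (l : List Char) :
    ∀ (m : PvTrie), pvWF m = true → pvIsLeaf m = false →
      pvWalk m l = pvFM l (pvRes m) := by
  induction l with
  | nil =>
      intro m hwf hleaf
      symm
      apply pvFM_none_of_miss
      intro pr hpr
      obtain ⟨k, p', hp, _⟩ := pvRes_heads m hwf hleaf pr hpr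
      simp [hp, PySem.Chars.startswith]
  | cons c cs ihl =>
      intro m
      induction m with
      | leaf s => intro _ h; simp [pvIsLeaf] at h
      | nil => intro _ _; simp [pvWalk, pvMapGet, pvRes, pvFM]
      | cons k t r _ ihr =>
          intro hwf _
          simp only [pvWF, Bool.and_eq_true, Bool.not_eq_true'] at hwf
          obtain ⟨⟨⟨⟨hkey, htnil⟩, hrleaf⟩, hwft⟩, hwfr⟩ := hwf
          by_cases hk : (k == c) = true
          · have hkc : k = c := by simpa using hk
            subst hkc
            simp only [pvRes, pvFM_append]
            cases t with
            | leaf s =>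
                simp [pvWalk, pvMapGet, pvRes, pvFM, PySem.Chars.startswith, List.isPrefixOf]
            | nil => simp [pvIsNil] at htnil
            | cons k' t' r' =>
                have hwalk : pvWalk (PvTrie.cons k' t' r') cs = pvFM cs (pvRes (PvTrie.cons k' t' r')) :=
                  ihl _ hwft (by simp [pvIsLeaf])
                simp only [pvWalk, pvMapGet, beq_self_eq_true, if_pos]
                rw [hwalk, pvFM_map_cons,
                    pvFM_res_none_of_not_key k cs r hwfr hrleaf (by simpa using hkey)]
                cases pvFM cs (pvRes (PvTrie.cons k' t' r')) <;> rfl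
          · have hwr : pvWalk (.cons k t r) (c :: cs) = pvWalk r (c :: cs) := by
              cases r <;> simp [pvWalk, pvMapGet, hk]
            rw [hwr, ihr hwfr hrleaf]
            simp only [pvRes, pvFM_append]
            have hmiss : pvFM (c :: cs) ((pvRes t).map (fun pr => (k :: pr.1, pr.2))) = none := by
              apply pvFM_none_of_miss
              intro pr hpr
              simp only [List.mem_map] at hpr
              obtain ⟨q, _, rfl⟩ := hpr
              simp [PySem.Chars.startswith, List.isPrefixOf]
              intro h; exact absurd (by simp [h]) hk
            rw [hmiss]
            cases pvFM (c :: cs) (pvRes r) <;> rfl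

theorem pvRes_root :
    pvRes pvTrieRoot =
      [(['w','h','a','t'], "factual"), (['w','h','o'], "factual"),
       (['w','h','e','n'], "factual"), (['w','h','e','r','e'], "factual"),
       (['w','h','y'], "explanatory"), (['h','o','w'], "explanatory"),
       (['c','o','m','p','a','r','e'], "comparative"),
       (['c','o','n','t','r','a','s','t'], "comparative"),
       (['d','i','f','f','e','r','e','n','c','e'], "comparative"),
       (['a','n','a','l','y','z','e'], "analytical"),
       (['a','s','s','e','s','s'], "analytical"),
       (['e','v','a','l','u','a','t','e'], "analytical")] := by rfl

-- regrouping: first-match over the trie-ordered residuals equals A's grouped if/elif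
-- chain, purely propositionally (the label runs coincide)
set_option maxHeartbeats 1600000 in
theorem pvChain (b1 b2 b3 b4 b5 b6 b7 b8 b9 b10 b11 b12 : Bool) (d : String) :
    (match (if b1 then some "factual" else if b2 then some "factual"
            else if b3 then some "factual" else if b4 then some "factual"
            else if b5 then some "explanatory" else if b6 then some "explanatory"
            else if b7 then some "comparative" else if b8 then some "comparative"
            else if b9 then some "comparative" else if b10 then some "analytical"
            else if b11 then some "analytical" else if b12 then some "analytical"
            else (none : Option String)) with
     | some lab => lab
     | none => d)
    = (if b1 || b2 || b3 || b4 then "factual"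
       else if b6 || b5 then "explanatory"
       else if b7 || b8 || b9 then "comparative"
       else if b10 || b12 || b11 then "analytical"
       else d) := by
  cases b1 <;> cases b2 <;> cases b3 <;> cases b4 <;> cases b5 <;> cases b6 <;>
    cases b7 <;> cases b8 <;> cases b9 <;> cases b10 <;> cases b11 <;> cases b12 <;> rfl

theorem pvChainList (l : List Char) (d : String) :
    (if PySem.Chars.startswith l "what".toList || PySem.Chars.startswith l "who".toList ||
        PySem.Chars.startswith l "when".toList || PySem.Chars.startswith l "where".toList then "factual"
     else if PySem.Chars.startswith l "how".toList || PySem.Chars.startswith l "why".toList then "explanatory"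
     else if PySem.Chars.startswith l "compare".toList || PySem.Chars.startswith l "contrast".toList ||
             PySem.Chars.startswith l "difference".toList then "comparative"
     else if PySem.Chars.startswith l "analyze".toList || PySem.Chars.startswith l "evaluate".toList ||
             PySem.Chars.startswith l "assess".toList then "analytical"
     else d)
    = (match pvFM l
        [(['w','h','a','t'], "factual"), (['w','h','o'], "factual"),
         (['w','h','e','n'], "factual"), (['w','h','e','r','e'], "factual"),
         (['w','h','y'], "explanatory"), (['h','o','w'], "explanatory"),
         (['c','o','m','p','a','r','e'], "comparative"),
         (['c','o','n','t','r','a','s','t'], "comparative"),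
         (['d','i','f','f','e','r','e','n','c','e'], "comparative"),
         (['a','n','a','l','y','z','e'], "analytical"),
         (['a','s','s','e','s','s'], "analytical"),
         (['e','v','a','l','u','a','t','e'], "analytical")] with
       | some lab => lab
       | none => d) :=
  (pvChain
    (PySem.Chars.startswith l ['w','h','a','t'])
    (PySem.Chars.startswith l ['w','h','o'])
    (PySem.Chars.startswith l ['w','h','e','n'])
    (PySem.Chars.startswith l ['w','h','e','r','e'])
    (PySem.Chars.startswith l ['w','h','y'])
    (PySem.Chars.startswith l ['h','o','w'])
    (PySem.Chars.startswith l ['c','o','m','p','a','r','e'])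
    (PySem.Chars.startswith l ['c','o','n','t','r','a','s','t'])
    (PySem.Chars.startswith l ['d','i','f','f','e','r','e','n','c','e'])
    (PySem.Chars.startswith l ['a','n','a','l','y','z','e'])
    (PySem.Chars.startswith l ['a','s','s','e','s','s'])
    (PySem.Chars.startswith l ['e','v','a','l','u','a','t','e'])
    d).symm

theorem pvOne_eq (q : String) : pvClassifyOneA q = pvClassifyOneB q := by
  unfold pvClassifyOneA pvClassifyOneB pvMatchTrie
  have hwf : pvWF pvTrieRoot = true := rfl
  have hnl : pvIsLeaf pvTrieRoot = false := rfl
  rw [pvWalk_eq_pvFM ((PySem.Str.strip (PySem.Str.lower q)).toList) pvTrieRoot hwf hnl,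
      pvRes_root]
  exact pvChainList ((PySem.Str.strip (PySem.Str.lower q)).toList)
    (if !(PySem.Str.isIn "?" q) then "statement" else "other")

theorem pvFoldl_eq (l : List String) (acc : List String) :
    l.foldl (fun types question => types ++ [pvClassifyOneA question]) acc =
      l.foldl (fun types question => types ++ [pvClassifyOneB question]) acc := by
  induction l generalizing acc with
  | nil => simp only [List.foldl_nil]
  | cons x xs ih =>
      rw [List.foldl_cons, List.foldl_cons, pvOne_eq]
      exact ih _

-- ===== VERDICT (by name: the statement is the Claim_ definition above) =====
theorem classify_question_types_py_spec : Claim_equal_classify_question_types_py := by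
  intro questions _
  unfold Spec_classify_question_types_py classify_question_types_py classify_question_types_py_alt
  exact pvFoldl_eq questions []
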